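-- pv_equiv track=rewrite | github.com/ayush-kumar-singh-git/Sliding-Tile-Puzzle | basicFunctions.py | evaluate
-- ===== SOURCE A (Python) =====
-- n = 3
--
-- def evaluate(board) :
--     eval = 0
--     for i in range(n) :
--         for j in range(n) :
--             x = int(board[i][j]/3)
--             y = board[i][j]%3
--             if board[i][j] != (3*i + j) :
--                 eval += (abs(x-i) + abs(y-j))
--     return eval
-- ===== SOURCE B (Python) =====
-- def evaluate(board):
--     # Group-by-value index: one pass records where each tile value sits, then the
--     # cost is accumulated per distinct value, computing its goal cell only once.
--     places = {}
--     for i in range(3):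
--         for j in range(3):
--             places.setdefault(board[i][j], []).append((i, j))
--     total = 0
--     for v, cells in places.items():
--         gi, gj = int(v / 3), v % 3  # goal cell of tile value v
--         for i, j in cells:
--             total += abs(i - gi) + abs(j - gj)
--     return total
-- ===== Notes on version B (the rewrite author's own statement) =====
-- stated objective: alternative
-- what changed: B first builds a value->positions index of the 3x3 window in one pass, then traverses by distinct tile value, computing each value's goal cell once and summing the distances of its occurrences, instead of A's direct per-cell guarded accumulation.
import Mathlib
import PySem

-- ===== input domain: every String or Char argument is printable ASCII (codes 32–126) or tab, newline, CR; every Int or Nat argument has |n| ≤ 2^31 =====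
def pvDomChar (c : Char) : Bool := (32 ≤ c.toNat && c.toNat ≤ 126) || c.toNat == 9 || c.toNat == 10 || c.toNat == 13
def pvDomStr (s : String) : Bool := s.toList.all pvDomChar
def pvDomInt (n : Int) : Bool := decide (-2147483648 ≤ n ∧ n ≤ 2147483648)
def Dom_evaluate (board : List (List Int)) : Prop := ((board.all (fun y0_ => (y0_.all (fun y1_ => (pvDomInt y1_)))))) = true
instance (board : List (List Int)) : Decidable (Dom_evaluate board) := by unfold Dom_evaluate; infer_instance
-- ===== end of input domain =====

-- B groups the 3x3 window's cells by tile value in one index-building pass, then sums the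
-- distances per distinct value (goal cell computed once per value), instead of A's direct
-- per-cell guarded accumulation (alternative decomposition, same cost).

-- ===== PORT A =====
-- int(board[i][j]/3) truncates the float quotient toward zero; on Dom (|v| ≤ 2^31) the float
-- division is accurate enough that this equals integer truncation toward zero, i.e. Int.tdiv.
def evaluate (board : List (List Int)) : Int :=
  (PySem.List.pyRange 0 3 1).foldl (fun ev i =>
    (PySem.List.pyRange 0 3 1).foldl (fun ev j =>
      let v := PySem.List.pyGetD (PySem.List.pyGetD board i []) j 0
      let x := Int.tdiv v 3
      let y := PySem.Int.mod v 3
      if v ≠ 3 * i + j then ev + (|x - i| + |y - j|) else ev) ev) 0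

-- ===== PORT B =====
-- places.setdefault(v, []).append((i, j)) on a dict = Dict.modify v [] (· ++ [(i, j)]);
-- int(v / 3) is again Int.tdiv (exact on Dom, see above).
def evaluate_alt (board : List (List Int)) : Int :=
  let places := (PySem.List.pyRange 0 3 1).foldl (fun d i =>
    (PySem.List.pyRange 0 3 1).foldl (fun d j =>
      d.modify (PySem.List.pyGetD (PySem.List.pyGetD board i []) j 0) [] (· ++ [(i, j)])) d)
    (PySem.Dict.empty : PySem.Dict Int (List (Int × Int)))
  places.items.foldl (fun total p =>
    let gi := Int.tdiv p.1 3
    let gj := PySem.Int.mod p.1 3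
    p.2.foldl (fun total c => total + (|c.1 - gi| + |c.2 - gj|)) total) 0

-- ===== PRECONDITION & SPEC =====
-- A raises IndexError unless there are at least 3 rows each with at least 3 entries.
def Pre_evaluate (board : List (List Int)) : Prop :=
  3 ≤ board.length ∧ ∀ r ∈ board.take 3, 3 ≤ r.length
instance (board : List (List Int)) : Decidable (Pre_evaluate board) := by
  unfold Pre_evaluate; infer_instance
def pvWitness_evaluate : List (List Int) := [[0, 1, 2], [3, 4, 5], [6, 7, 8]]

def Spec_evaluate (board : List (List Int)) (out : Int) : Prop := out = evaluate_alt board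
instance (board : List (List Int)) (out : Int) : Decidable (Spec_evaluate board out) := by
  unfold Spec_evaluate; infer_instance

-- ===== CLAIM (what is proved, stated in full; the proofs are below) =====
def Claim_equal_evaluate : Prop :=
  ∀ (board : List (List Int)), Dom_evaluate board → Pre_evaluate board →
    Spec_evaluate board (evaluate board)

-- ===== LEMMAS AND PROOFS =====

-- One tile's cost as B computes it: distance of cell c from the goal cell of value v.
def pvDist (v : Int) (c : Int × Int) : Int :=
  |c.1 - Int.tdiv v 3| + |c.2 - PySem.Int.mod v 3|

-- A's guarded per-cell term equals the unguarded distance (the skipped case contributes 0).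
theorem pv_cellA (e v i j : Int) (hi : 0 ≤ i) (hj : 0 ≤ j) (hj3 : j < 3) :
    (if v ≠ 3 * i + j then e + (|Int.tdiv v 3 - i| + |PySem.Int.mod v 3 - j|) else e)
      = e + pvDist v (i, j) := by
  have hm : PySem.Int.mod v 3 = v % 3 := PySem.Int.mod_eq_emod_of_pos (by norm_num)
  unfold pvDist
  by_cases h : v = 3 * i + j
  · have hv : 0 ≤ v := by omega
    have ht : Int.tdiv v 3 = v / 3 := Int.tdiv_eq_ediv_of_nonneg hv
    rw [if_neg (by simp [h]), ht, hm]
    have h1 : v / 3 = i := by omega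
    have h2 : v % 3 = j := by omega
    simp [h1, h2]
  · rw [if_pos h, abs_sub_comm (Int.tdiv v 3), abs_sub_comm (PySem.Int.mod v 3)]

-- B's inner occurrence loop is a sum.
theorem pv_inner (v : Int) : ∀ (cs : List (Int × Int)) (t : Int),
    cs.foldl (fun t c => t + (|c.1 - Int.tdiv v 3| + |c.2 - PySem.Int.mod v 3|)) t
      = t + (cs.map (pvDist v)).sum := by
  intro cs t
  exact PySem.List.foldl_add (g := pvDist v) cs t

-- B's outer loop over the dict items is a sum of per-value sums.
theorem pv_outer : ∀ (items : List (Int × List (Int × Int))) (t : Int),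
    items.foldl (fun t p =>
        p.2.foldl (fun t c => t + (|c.1 - Int.tdiv p.1 3| + |c.2 - PySem.Int.mod p.1 3|)) t) t
      = t + (items.map (fun p => ((p.2.map (pvDist p.1)).sum))).sum := by
  intro items
  induction items with
  | nil => intro t; simp
  | cons p rest ih =>
    intro t
    rw [List.foldl_cons, pv_inner p.1 p.2 t, ih, List.map_cons, List.sum_cons, add_assoc]

-- Splitting a sum over a list by a Boolean predicate.
theorem pv_split (g : Int × (Int × Int) → Int) (q : Int × (Int × Int) → Bool) :
    ∀ (L : List (Int × (Int × Int))),
      ((L.filter q).map g).sum + ((L.filter (fun p => !q p)).map g).sum = (L.map g).sum := by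
  intro L
  induction L with
  | nil => simp
  | cons p rest ih =>
    by_cases h : q p = true
    · simp [h, add_assoc, ih]
    · simp only [List.filter_cons, h, Bool.not_eq_true] at *
      simp [List.map_cons, List.sum_cons, ← ih]
      ring

-- Summing group-by-key blocks over a covering nodup key list recovers the plain sum.
theorem pv_partition (g : Int × (Int × Int) → Int) :
    ∀ (K : List Int) (L : List (Int × (Int × Int))), K.Nodup → (∀ p ∈ L, p.1 ∈ K) →
      (K.map (fun k => ((L.filter (fun p => p.1 == k)).map g).sum)).sum = (L.map g).sum := by
  intro K
  induction K with
  | nil =>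
    intro L _ hcov
    cases L with
    | nil => simp
    | cons p rest => exact absurd (hcov p (by simp)) (by simp)
  | cons k K' ih =>
    intro L hnd hcov
    have hk : k ∉ K' := (List.nodup_cons.mp hnd).1
    have hnd' : K'.Nodup := (List.nodup_cons.mp hnd).2
    set L' := L.filter (fun p => !(p.1 == k)) with hL'
    have hfix : ∀ k' ∈ K', L.filter (fun p => p.1 == k') = L'.filter (fun p => p.1 == k') := by
      intro k' hk'
      rw [hL', List.filter_filter]
      apply List.filter_congr
      intro p _
      by_cases h : p.1 = k'
      · have hne : k' ≠ k := fun hkk => hk (hkk ▸ hk')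
        simp [h, hne]
      · simp [h]
    have hcov' : ∀ p ∈ L', p.1 ∈ K' := by
      intro p hp
      rw [hL', List.mem_filter] at hp
      have := hcov p hp.1
      simp at hp
      rcases List.mem_cons.mp this with h | h
      · exact absurd h hp.2
      · exact h
    calc (((k :: K').map (fun k => ((L.filter (fun p => p.1 == k)).map g).sum)).sum)
        = ((L.filter (fun p => p.1 == k)).map g).sum
            + (K'.map (fun k' => ((L.filter (fun p => p.1 == k')).map g).sum)).sum := by
          simp
      _ = ((L.filter (fun p => p.1 == k)).map g).sum
            + (K'.map (fun k' => ((L'.filter (fun p => p.1 == k')).map g).sum)).sum := by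
          congr 1
          congr 1
          exact List.map_congr_left (fun k' hk' => by rw [hfix k' hk'])
      _ = ((L.filter (fun p => p.1 == k)).map g).sum + (L'.map g).sum := by
          rw [ih L' hnd' hcov']
      _ = (L.map g).sum := pv_split g (fun p => p.1 == k) L

-- Items of a nodup-keyed dict are its keys paired with their getD values.
theorem pv_items_eq_keys_map (d : PySem.Dict Int (List (Int × Int)))
    (h : d.keys.Nodup) : d.items = d.keys.map (fun k => (k, d.getD k [])) := by
  simp only [PySem.Dict.keys, List.map_map]
  conv_lhs => rw [← List.map_id d.items]
  apply List.map_congr_left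
  intro p hp
  have hm : (p.1, p.2) ∈ d.items := by simpa using hp
  have : d.getD p.1 [] = p.2 := PySem.Dict.getD_of_mem_items d hm h []
  simp [Function.comp, this]

-- The whole of B, for a dict built by the grouping loop over an arbitrary cell list.
theorem pv_groupsum (L : List (Int × (Int × Int))) :
    ((L.foldl (fun d p => d.modify p.1 [] (· ++ [p.2]))
        (PySem.Dict.empty : PySem.Dict Int (List (Int × Int)))).items.foldl
      (fun t p =>
        p.2.foldl (fun t c => t + (|c.1 - Int.tdiv p.1 3| + |c.2 - PySem.Int.mod p.1 3|)) t) 0)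
      = (L.map (fun p => pvDist p.1 p.2)).sum := by
  set d := L.foldl (fun d p => d.modify p.1 [] (· ++ [p.2]))
    (PySem.Dict.empty : PySem.Dict Int (List (Int × Int))) with hd
  have hkeys : d.keys = PySem.Set.ofList (L.map Prod.fst) := by
    rw [hd, PySem.Dict.keys_foldl_modify_key]
    simp [PySem.Set.update_nil_left]
  have hnd : d.keys.Nodup := by
    rw [hkeys]; exact PySem.Set.nodup_ofList _
  have hgetD : ∀ k, d.getD k [] = (L.filter (fun p => p.1 == k)).map Prod.snd := by
    intro k
    rw [hd, PySem.Dict.getD_foldl_modify_append]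
    simp
  rw [pv_outer, pv_items_eq_keys_map d hnd, hkeys]
  have hblock : ∀ k,
      (((PySem.Dict.getD d k []).map (pvDist k)).sum)
        = ((L.filter (fun p => p.1 == k)).map (fun p => pvDist p.1 p.2)).sum := by
    intro k
    rw [hgetD k, List.map_map]
    congr 1
    apply List.map_congr_left
    intro p hp
    have : p.1 = k := by simpa using (List.mem_filter.mp hp).2
    simp [Function.comp, this]
  calc (0 : Int) + (((PySem.Set.ofList (L.map Prod.fst)).map
          (fun k => (k, d.getD k []))).map (fun p => ((p.2.map (pvDist p.1)).sum))).sum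
      = ((PySem.Set.ofList (L.map Prod.fst)).map
          (fun k => ((L.filter (fun p => p.1 == k)).map (fun p => pvDist p.1 p.2)).sum)).sum := by
        rw [zero_add, List.map_map]
        exact congrArg List.sum (List.map_congr_left (fun k _ => hblock k))
    _ = (L.map (fun p => pvDist p.1 p.2)).sum := by
        apply pv_partition
        · exact PySem.Set.nodup_ofList _
        · intro p hp
          rw [PySem.Set.mem_ofList]
          exact List.mem_map_of_mem hp

set_option maxHeartbeats 2000000 in
-- ===== VERDICT (by name: the statement is the Claim_ definition above) =====
theorem evaluate_spec : Claim_equal_evaluate := by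
  intro board _ hpre
  obtain ⟨hlen, hrows⟩ := hpre
  rcases board with _ | ⟨r0, board⟩; · simp at hlen
  rcases board with _ | ⟨r1, board⟩; · simp at hlen
  rcases board with _ | ⟨r2, rest⟩; · simp at hlen
  have h0 : 3 ≤ r0.length := hrows r0 (by simp)
  have h1 : 3 ≤ r1.length := hrows r1 (by simp)
  have h2 : 3 ≤ r2.length := hrows r2 (by simp)
  rcases r0 with _ | ⟨a0, r0⟩; · simp at h0
  rcases r0 with _ | ⟨a1, r0⟩; · simp at h0
  rcases r0 with _ | ⟨a2, t0⟩; · simp at h0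
  rcases r1 with _ | ⟨b0, r1⟩; · simp at h1
  rcases r1 with _ | ⟨b1, r1⟩; · simp at h1
  rcases r1 with _ | ⟨b2, t1⟩; · simp at h1
  rcases r2 with _ | ⟨c0, r2⟩; · simp at h2
  rcases r2 with _ | ⟨c1, r2⟩; · simp at h2
  rcases r2 with _ | ⟨c2, t2⟩; · simp at h2
  show evaluate _ = evaluate_alt _
  have hr3 : PySem.List.pyRange 0 3 1 = [0, 1, 2] := by decide
  have hB := pv_groupsum [(a0, ((0 : Int), (0 : Int))), (a1, (0, 1)), (a2, (0, 2)),
    (b0, (1, 0)), (b1, (1, 1)), (b2, (1, 2)), (c0, (2, 0)), (c1, (2, 1)), (c2, (2, 2))]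
  simp only [evaluate, evaluate_alt, hr3, List.foldl]
  rw [pv_cellA, pv_cellA, pv_cellA, pv_cellA, pv_cellA, pv_cellA, pv_cellA, pv_cellA, pv_cellA]
  · simp only [List.foldl] at hB
    norm_num [pysem] at hB ⊢
    rw [hB]
    simp [pvDist]
    ring
  all_goals norm_num
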